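-- pv_equiv track=rewrite | github.com/jpbruneton/QDSR | Utils/Utils_misc.py | generate_lists
-- ===== SOURCE A (Python) =====
-- def generate_lists(inf, sup, size):
--     """Generate all possible lists of size 'size' with values between inf and sup."""
--     result = []
--
--     def nested_loops(current_list, current_depth):
--         if current_depth == size:
--             result.append(current_list.copy())
--             return
--
--         for i in range(inf, sup + 1):
--             current_list[current_depth] = i
--             nested_loops(current_list, current_depth + 1)
--
--     nested_loops([0] * size, 0)
--     return result
-- ===== SOURCE B (Python) =====
-- def generate_lists(inf, sup, size):
--     """Generate all possible lists of size 'size' with values between inf and sup."""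
--     result = [[]]
--     for _ in range(size):
--         result = [lst + [i] for lst in result for i in range(inf, sup + 1)]
--     return result
-- ===== Notes on version B (the rewrite author's own statement) =====
-- stated objective: simpler
-- what changed: Replaces the recursive nested-loop simulation over a shared mutable buffer by a bottom-up iterative product: start from [[]] and extend every partial list by one coordinate per round.
-- outside the precondition, e.g. on generate_lists(3, 1, -1): A returns [], B returns [[]]; on generate_lists(1, 2, -1): A raises IndexError, B returns [[]]
import Mathlib
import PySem

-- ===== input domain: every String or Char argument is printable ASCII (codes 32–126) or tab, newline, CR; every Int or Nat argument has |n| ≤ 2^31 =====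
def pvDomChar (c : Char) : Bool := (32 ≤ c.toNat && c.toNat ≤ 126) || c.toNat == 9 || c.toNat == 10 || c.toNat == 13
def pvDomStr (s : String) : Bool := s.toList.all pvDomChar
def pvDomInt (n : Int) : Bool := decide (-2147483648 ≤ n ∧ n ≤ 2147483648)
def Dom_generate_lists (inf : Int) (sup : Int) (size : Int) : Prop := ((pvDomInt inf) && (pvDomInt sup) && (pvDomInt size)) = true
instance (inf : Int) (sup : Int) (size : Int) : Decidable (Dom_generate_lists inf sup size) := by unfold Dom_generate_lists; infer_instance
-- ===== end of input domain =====

-- B replaces A's recursion over a shared mutable buffer by an iterative bottom-up product (objective: simpler).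

-- ===== PORT A =====
-- nested_loops: rem = size - current_depth (as fuel); state = (current_list, result)
def nestedLoopsA (inf : Int) (sup : Int) (rem : Nat) (depth : Nat)
    (cur : List Int) (res : List (List Int)) : List Int × List (List Int) :=
  match rem with
  | 0 => (cur, res ++ [cur])
  | r + 1 =>
    (PySem.List.pyRange inf (sup + 1) 1).foldl
      (fun st i => nestedLoopsA inf sup r (depth + 1) (st.1.set depth i) st.2)
      (cur, res)

def generate_lists (inf : Int) (sup : Int) (size : Int) : List (List Int) :=
  (nestedLoopsA inf sup size.toNat 0 (List.replicate size.toNat (0 : Int)) []).2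

-- ===== PORT B =====
def generate_lists_alt (inf : Int) (sup : Int) (size : Int) : List (List Int) :=
  (PySem.List.pyRange 0 size 1).foldl
    (fun result _ =>
      result.flatMap (fun lst => (PySem.List.pyRange inf (sup + 1) 1).map (fun i => lst ++ [i])))
    [[]]

-- ===== PRECONDITION & SPEC =====
-- Pre_ excludes negative size, outside the function's natural domain: there A raises IndexError
-- whenever inf ≤ sup, and accidentally returns [] (empty range loop over a zero-length buffer)
-- when inf > sup, while B naturally returns [[]].
def Pre_generate_lists (inf : Int) (sup : Int) (size : Int) : Prop := 0 ≤ size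
instance (inf : Int) (sup : Int) (size : Int) : Decidable (Pre_generate_lists inf sup size) := by
  unfold Pre_generate_lists; infer_instance
def pvWitness_generate_lists : Int × Int × Int := (0, 2, 2)

def Spec_generate_lists (inf : Int) (sup : Int) (size : Int) (out : List (List Int)) : Prop := out = generate_lists_alt inf sup size
instance (inf : Int) (sup : Int) (size : Int) (out : List (List Int)) : Decidable (Spec_generate_lists inf sup size out) := by unfold Spec_generate_lists; infer_instance

-- ===== CLAIM (what is proved, stated in full; the proofs are below) =====
def Claim_equal_generate_lists : Prop := ∀ (inf : Int) (sup : Int) (size : Int), Dom_generate_lists inf sup size → Pre_generate_lists inf sup size → Spec_generate_lists inf sup size (generate_lists inf sup size)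

-- ===== LEMMAS AND PROOFS =====

-- the lexicographic k-fold product of R, position 0 most significant
def tuples (R : List Int) : Nat → List (List Int)
  | 0 => [[]]
  | n + 1 => R.flatMap (fun i => (tuples R n).map (fun t => i :: t))

theorem take_set_append (cur : List Int) (depth : Nat) (i : Int) (h : depth < cur.length) :
    (cur.set depth i).take (depth + 1) = cur.take depth ++ [i] := by
  rw [List.take_add_one, List.getElem?_set_self (by simpa using h),
      List.take_set_of_le (le_refl depth)]
  rfl

theorem nlA_spec (inf sup : Int) :
    ∀ (rem depth : Nat) (cur : List Int) (res : List (List Int)),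
      cur.length = depth + rem →
      (nestedLoopsA inf sup rem depth cur res).2
          = res ++ (tuples (PySem.List.pyRange inf (sup + 1) 1) rem).map
              (fun t => cur.take depth ++ t)
        ∧ (nestedLoopsA inf sup rem depth cur res).1.length = cur.length
        ∧ (nestedLoopsA inf sup rem depth cur res).1.take depth = cur.take depth := by
  intro rem
  induction rem with
  | zero =>
    intro depth cur res h
    simp [nestedLoopsA, tuples, List.take_of_length_le (show cur.length ≤ depth by omega)]
  | succ r ih =>
    intro depth cur res h
    -- inner induction over the (arbitrary) list the foldl consumes
    have inner : ∀ (L : List Int) (cur : List Int) (res : List (List Int)),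
        cur.length = depth + (r + 1) →
        (L.foldl (fun st i => nestedLoopsA inf sup r (depth + 1) (st.1.set depth i) st.2)
            (cur, res)).2
            = res ++ L.flatMap (fun i =>
                (tuples (PySem.List.pyRange inf (sup + 1) 1) r).map
                  (fun t => cur.take depth ++ i :: t))
          ∧ (L.foldl (fun st i => nestedLoopsA inf sup r (depth + 1) (st.1.set depth i) st.2)
              (cur, res)).1.length = cur.length
          ∧ (L.foldl (fun st i => nestedLoopsA inf sup r (depth + 1) (st.1.set depth i) st.2)
              (cur, res)).1.take depth = cur.take depth := by
      intro L
      induction L with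
      | nil => intro cur res h; simp
      | cons i L ihL =>
        intro cur res h
        have hlt : depth < cur.length := by omega
        have hlen : (cur.set depth i).length = (depth + 1) + r := by
          simp [List.length_set]; omega
        obtain ⟨h2, h1len, h1take⟩ := ih (depth + 1) (cur.set depth i) res hlen
        set p := nestedLoopsA inf sup r (depth + 1) (cur.set depth i) res with hp
        have htake1 : (cur.set depth i).take (depth + 1) = cur.take depth ++ [i] :=
          take_set_append cur depth i hlt
        have hpdep : p.1.take depth = cur.take depth := by
          have h0 := congrArg (List.take depth) h1take
          rw [List.take_take, List.take_take, Nat.min_eq_left (Nat.le_succ depth),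
              List.take_set_of_le (le_refl depth)] at h0
          exact h0
        have hplen : p.1.length = depth + (r + 1) := by
          rw [h1len]; simp [List.length_set]; omega
        obtain ⟨g2, g1len, g1take⟩ := ihL p.1 p.2 hplen
        refine ⟨?_, ?_, ?_⟩
        · rw [List.foldl_cons]
          show (L.foldl _ (p.1, p.2)).2 = _
          rw [g2, h2, htake1]
          simp [List.flatMap_cons, List.append_assoc, hpdep]
        · rw [List.foldl_cons]
          show (L.foldl _ (p.1, p.2)).1.length = _
          rw [g1len, h1len]; simp [List.length_set]
        · rw [List.foldl_cons]
          show (L.foldl _ (p.1, p.2)).1.take depth = _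
          rw [g1take, hpdep]
    obtain ⟨g2, g1, g3⟩ := inner (PySem.List.pyRange inf (sup + 1) 1) cur res h
    refine ⟨?_, ?_, ?_⟩
    · simp only [nestedLoopsA]
      rw [g2]
      congr 1
      simp [tuples, List.map_flatMap, List.map_map, Function.comp_def]
    · simp only [nestedLoopsA]; exact g1
    · simp only [nestedLoopsA]; exact g3

-- appending one coordinate on the right extends the product by one level
theorem tuples_snoc (R : List Int) (n : Nat) :
    (tuples R n).flatMap (fun l => R.map (fun i => l ++ [i])) = tuples R (n + 1) := by
  induction n with
  | zero => simp [tuples, List.map_eq_flatMap]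
  | succ n ihn =>
    rw [show tuples R (n + 1 + 1)
          = R.flatMap (fun i => (tuples R (n + 1)).map (fun t => i :: t)) from rfl]
    conv_lhs => rw [show tuples R (n + 1)
          = R.flatMap (fun i => (tuples R n).map (fun t => i :: t)) from rfl]
    rw [← ihn]
    simp [List.flatMap_assoc, List.flatMap_map, List.map_flatMap, List.map_map,
          Function.comp_def]

theorem foldl_const_iterate {α β : Type} (f : α → α) :
    ∀ (l : List β) (init : α), l.foldl (fun a _ => f a) init = f^[l.length] init := by
  intro l
  induction l with
  | nil => intro init; simp
  | cons x l ihl => intro init; simp [ihl, Function.iterate_succ_apply]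

theorem iterate_step_tuples (inf sup : Int) (n : Nat) :
    (fun result : List (List Int) =>
        result.flatMap (fun lst =>
          (PySem.List.pyRange inf (sup + 1) 1).map (fun i => lst ++ [i])))^[n] [[]]
      = tuples (PySem.List.pyRange inf (sup + 1) 1) n := by
  induction n with
  | zero => simp [tuples]
  | succ n ihn =>
    rw [Function.iterate_succ_apply', ihn, tuples_snoc]

-- ===== VERDICT (by name: the statement is the Claim_ definition above) =====
theorem generate_lists_spec : Claim_equal_generate_lists := by
  intro inf sup size _ hpre
  unfold Spec_generate_lists generate_lists generate_lists_alt
  have hlen : (List.replicate size.toNat (0 : Int)).length = 0 + size.toNat := by simp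
  obtain ⟨h2, -, -⟩ := nlA_spec inf sup size.toNat 0 (List.replicate size.toNat (0 : Int)) [] hlen
  rw [h2, foldl_const_iterate, PySem.List.length_pyRange_one]
  simp only [Int.sub_zero]
  rw [iterate_step_tuples]
  simp
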